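-- pv_equiv track=rewrite | github.com/nachodall/UBA-FCEN-IP-AyED1 | Guía 10: Archivos, Pilas, Colas y Diccionarios/p10e20.py | getMaxKey
-- ===== SOURCE A (Python) =====
-- def getMaxKey(diccionario:dict) -> str:
--     max:int = 0
--     res:str = 'No hay palabras en el archivo'
--     for key in diccionario.keys():
--         if diccionario[key] > max:
--             max = diccionario[key]
--             res = key
--     return res
-- ===== SOURCE B (Python) =====
-- def getMaxKey(diccionario: dict) -> str:
--     orden = sorted(diccionario.items(), key=lambda kv: kv[1], reverse=True)
--     if orden and orden[0][1] > 0: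
--         return orden[0][0]
--     return 'No hay palabras en el archivo'
-- ===== Notes on version B (the rewrite author's own statement) =====
-- stated objective: alternative
-- what changed: Replaces A's single-pass running-max accumulator with a sort-then-pick algorithm: stable-sort the items by value in descending order (stability reproduces A's first-occurrence tie-breaking) and return the head key if its value is positive, else the default string.
import Mathlib
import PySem

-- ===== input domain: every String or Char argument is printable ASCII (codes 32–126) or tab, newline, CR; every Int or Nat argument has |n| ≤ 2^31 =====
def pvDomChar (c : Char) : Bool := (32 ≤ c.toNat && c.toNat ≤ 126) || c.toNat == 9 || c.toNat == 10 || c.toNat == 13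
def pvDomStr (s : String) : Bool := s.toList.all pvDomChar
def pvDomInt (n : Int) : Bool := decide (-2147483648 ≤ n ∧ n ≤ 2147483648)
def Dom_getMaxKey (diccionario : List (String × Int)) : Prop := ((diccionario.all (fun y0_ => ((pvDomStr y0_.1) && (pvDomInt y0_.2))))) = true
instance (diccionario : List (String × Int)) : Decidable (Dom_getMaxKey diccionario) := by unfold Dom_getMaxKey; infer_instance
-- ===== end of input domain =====

-- B replaces A's running-max accumulator loop with sort-then-pick: stable-sort the items by
-- value descending and take the head's key if its value is positive; same result, different algorithm.

-- ===== PORT A =====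
-- for key in diccionario.keys(): if diccionario[key] > max: max, res = diccionario[key], key
def getMaxKey (diccionario : List (String × Int)) : String :=
  ((diccionario.map Prod.fst).foldl
    (fun st key =>
      let v := (PySem.Dict.mk diccionario).getD key 0  -- diccionario[key]; key ∈ keys, so never raises
      if v > st.1 then (v, key) else st)
    ((0 : Int), "No hay palabras en el archivo")).2

-- ===== PORT B =====
def getMaxKey_alt (diccionario : List (String × Int)) : String :=
  -- orden = sorted(diccionario.items(), key=lambda kv: kv[1], reverse=True)
  let orden := PySem.List.sorted diccionario (fun kv => kv.2) true
  -- if orden and orden[0][1] > 0: return orden[0][0]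
  match orden with
  | kv :: _ => if kv.2 > 0 then kv.1 else "No hay palabras en el archivo"
  | [] => "No hay palabras en el archivo"

-- ===== PRECONDITION & SPEC =====
-- Pre_ excludes association lists with duplicate keys: they do not represent any Python dict
-- (A's parameter is a dict, whose keys are unique), so nothing is claimed about them.
def Pre_getMaxKey (diccionario : List (String × Int)) : Prop :=
  (diccionario.map Prod.fst).Nodup
instance (diccionario : List (String × Int)) : Decidable (Pre_getMaxKey diccionario) := by
  unfold Pre_getMaxKey; infer_instance

def pvWitness_getMaxKey : (List (String × Int)) := [("hola", 2), ("mundo", 5)]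

def Spec_getMaxKey (diccionario : List (String × Int)) (out : String) : Prop := out = getMaxKey_alt diccionario
instance (diccionario : List (String × Int)) (out : String) : Decidable (Spec_getMaxKey diccionario out) := by unfold Spec_getMaxKey; infer_instance

-- ===== CLAIM (what is proved, stated in full; the proofs are below) =====
def Claim_equal_getMaxKey : Prop := ∀ (diccionario : List (String × Int)), Dom_getMaxKey diccionario → Pre_getMaxKey diccionario → Spec_getMaxKey diccionario (getMaxKey diccionario)

-- ===== LEMMAS AND PROOFS =====

-- A's loop body, written over the (key, value) pair directly (state = (max, res))
def pvLoopA (st : Int × String) (kv : String × Int) : Int × String :=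
  if kv.2 > st.1 then (kv.2, kv.1) else st

-- the running "best pair" step: keep the first pair of maximal value
def pvBest (h kv : String × Int) : String × Int :=
  if h.2 < kv.2 then kv else h

-- With Nodup keys, iterating over keys() and looking each key up is the fold over the pairs.
theorem foldA_keys (d : List (String × Int)) (h : (d.map Prod.fst).Nodup)
    (st : Int × String) :
    (d.map Prod.fst).foldl
      (fun st key =>
        let v := (PySem.Dict.mk d).getD key 0
        if v > st.1 then (v, key) else st) st
      = d.foldl pvLoopA st := by
  rw [List.foldl_map]
  apply PySem.List.foldl_congr_mem
  intro acc kv hkv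
  have hv : (PySem.Dict.mk d).getD kv.1 0 = kv.2 := by
    apply PySem.Dict.getD_of_mem_items
    · exact hkv
    · simpa [PySem.Dict.keys_mk] using h
  simp [hv, pvLoopA]

-- the running best's value never decreases
theorem pvBest_mono (t : List (String × Int)) (h : String × Int) :
    h.2 ≤ (t.foldl pvBest h).2 := by
  induction t generalizing h with
  | nil => exact le_refl _
  | cons x t ih =>
    simp only [List.foldl_cons]
    refine le_trans ?_ (ih (pvBest h x))
    simp only [pvBest]; split_ifs with hx
    · exact le_of_lt hx
    · exact le_refl _

-- if the best's value did not increase, nothing was ever replaced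
theorem pvBest_fix (t : List (String × Int)) (h : String × Int)
    (hle : (t.foldl pvBest h).2 ≤ h.2) : t.foldl pvBest h = h := by
  induction t generalizing h with
  | nil => rfl
  | cons x t ih =>
    simp only [List.foldl_cons] at hle ⊢
    by_cases hx : h.2 < x.2
    · exfalso
      rw [show pvBest h x = x from by simp [pvBest, hx]] at hle
      have := pvBest_mono t x
      omega
    · rw [show pvBest h x = h from by simp [pvBest, hx]] at hle ⊢
      exact ih h hle

-- A's fold from a sentinel st (with every seen pair's value ≤ st.1 so far) is the running best
-- thresholded at st.1.
theorem foldA_best (t : List (String × Int)) (st : Int × String) (h : String × Int)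
    (hh : h.2 ≤ st.1) :
    t.foldl pvLoopA st
      = (if (t.foldl pvBest h).2 > st.1
          then ((t.foldl pvBest h).2, (t.foldl pvBest h).1) else st) := by
  induction t generalizing st h with
  | nil => simp [show ¬ (h.2 > st.1) by omega]
  | cons x t ih =>
    simp only [List.foldl_cons]
    by_cases hx : x.2 > st.1
    · have hbx : pvBest h x = x := by simp [pvBest]; omega
      have hax : pvLoopA st x = (x.2, x.1) := by simp [pvLoopA, hx]
      rw [hax, hbx, ih (x.2, x.1) x (le_refl _)]
      by_cases hm : (t.foldl pvBest x).2 > x.2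
      · have : (t.foldl pvBest x).2 > st.1 := by omega
        simp [hm, this]
      · have hfix := pvBest_fix t x (by omega)
        rw [hfix]
        simp [show x.2 > st.1 from hx]
    · have hax : pvLoopA st x = st := by simp [pvLoopA]; omega
      have hh' : (pvBest h x).2 ≤ st.1 := by
        simp only [pvBest]; split_ifs <;> omega
      rw [hax, ih st (pvBest h x) hh']

-- head of Python's reverse-sorted list = running best over the items (stability of the
-- insertion sort: a later element displaces the head only when strictly greater)
theorem head_sorted_rev (t : List (String × Int)) (h : String × Int)
    (acc : List (String × Int)) :
    ∃ rest,
      t.foldl (fun acc x =>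
          PySem.List.insertBy (fun a b => decide ((fun kv : String × Int => kv.2) b
            < (fun kv : String × Int => kv.2) a)) x acc) (h :: acc)
        = (t.foldl pvBest h) :: rest := by
  induction t generalizing h acc with
  | nil => exact ⟨acc, rfl⟩
  | cons x t ih =>
    simp only [List.foldl_cons, PySem.List.insertBy]
    by_cases hx : h.2 < x.2
    · rw [if_pos (by simpa using hx)]
      have hb : pvBest h x = x := by simp [pvBest, hx]
      rw [hb]
      exact ih x (h :: acc)
    · rw [if_neg (by simpa using hx)]
      have hb : pvBest h x = h := by simp [pvBest, hx]
      rw [hb]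
      exact ih h _

-- ===== VERDICT (by name: the statement is the Claim_ definition above) =====
theorem getMaxKey_spec : Claim_equal_getMaxKey := by
  intro d _ hpre
  unfold Spec_getMaxKey getMaxKey getMaxKey_alt
  rw [foldA_keys d hpre]
  cases d with
  | nil => rfl
  | cons p t =>
    rw [PySem.List.sorted_rev_eq_foldl_insertBy]
    simp only [List.foldl_cons]
    obtain ⟨rest, hrest⟩ := head_sorted_rev t p []
    rw [show PySem.List.insertBy (fun a b =>
          decide ((fun kv : String × Int => kv.2) b < (fun kv : String × Int => kv.2) a)) p [] = [p]
        from rfl, hrest]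
    show _ = if (t.foldl pvBest p).2 > 0 then (t.foldl pvBest p).1
              else "No hay palabras en el archivo"
    by_cases hp : p.2 > 0
    · have hstep : pvLoopA (0, "No hay palabras en el archivo") p = (p.2, p.1) := by
        simp [pvLoopA, hp]
      rw [hstep, foldA_best t (p.2, p.1) p (le_refl _)]
      have hmp := pvBest_mono t p
      by_cases hgt : (t.foldl pvBest p).2 > p.2
      · rw [if_pos hgt, if_pos (show (t.foldl pvBest p).2 > 0 by omega)]
      · have hfix := pvBest_fix t p (by omega)
        rw [if_neg hgt, hfix, if_pos hp]
    · have hstep : pvLoopA (0, "No hay palabras en el archivo") p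
          = (0, "No hay palabras en el archivo") := by
        simp [pvLoopA]; omega
      rw [hstep, foldA_best t (0, "No hay palabras en el archivo") p (by omega)]
      by_cases hgt : (t.foldl pvBest p).2 > 0
      · rw [if_pos hgt, if_pos hgt]
      · rw [if_neg hgt, if_neg hgt]
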